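-- pv_equiv track=rewrite | github.com/Jamesprocode/FullPageJazzOMR | data_prep/prepare_stacked_data.py | _strip_terminator
-- ===== SOURCE A (Python) =====
-- def _strip_terminator(lines):
--     """Remove trailing *- spine-terminator lines."""
--     lines = list(lines)
--     while lines:
--         stripped = lines[-1].strip()
--         # match "*-\t*-", "*-", and similar
--         if all(part == "*-" for part in stripped.split("\t")):
--             lines.pop()
--         else:
--             break
--     return lines
-- ===== SOURCE B (Python) =====
-- def _strip_terminator(lines):
--     """Remove trailing *- spine-terminator lines."""
--     lines = list(lines)
--     keep = 0
--     for i, line in enumerate(lines):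
--         if any(part != "*-" for part in line.strip().split("\t")):
--             keep = i + 1
--     return lines[:keep]
-- ===== Notes on version B (the rewrite author's own statement) =====
-- stated objective: alternative
-- what changed: Replaces the backward pop-while loop with a single forward pass that records the index after the last non-terminator line (with the predicate inverted to any(part != '*-')) and returns that prefix by slicing; no backward traversal or mutation of the tail.
import Mathlib
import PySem

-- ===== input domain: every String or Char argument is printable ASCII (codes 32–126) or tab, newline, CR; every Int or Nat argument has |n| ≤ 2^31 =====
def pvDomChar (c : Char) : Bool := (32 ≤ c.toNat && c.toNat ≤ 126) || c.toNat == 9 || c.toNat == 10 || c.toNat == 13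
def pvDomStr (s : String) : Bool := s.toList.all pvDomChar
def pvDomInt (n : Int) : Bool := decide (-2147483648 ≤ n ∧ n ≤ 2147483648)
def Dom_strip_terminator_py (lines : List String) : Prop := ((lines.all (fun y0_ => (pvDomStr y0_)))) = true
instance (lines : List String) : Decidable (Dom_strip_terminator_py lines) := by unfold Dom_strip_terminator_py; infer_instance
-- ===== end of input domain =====

-- B replaces A's backward pop-while loop with one forward pass recording the kept-prefix length, returned by slicing (alternative decomposition; same cost).


-- ===== PORT A =====
-- the inline `all(part == "*-" for part in lines[-1].strip().split("\t"))` test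
def pvTermTestA (s : String) : Bool :=
  ((PySem.Chars.splitOn (PySem.Chars.strip s.toList) "\t".toList).all (fun part => part == "*-".toList))

-- while lines: check last line; pop or break
def strip_terminator_py (lines : List String) : List String :=
  if h : lines = [] then lines
  else
    if pvTermTestA (lines.getLast h) then strip_terminator_py lines.dropLast
    else lines
termination_by lines.length
decreasing_by
  have := List.length_pos_of_ne_nil h
  simp [List.length_dropLast]
  omega

-- ===== PORT B =====
-- `any(part != "*-" for part in line.strip().split("\t"))`
def pvNotTermB (line : String) : Bool :=
  ((PySem.Chars.splitOn (PySem.Chars.strip line.toList) "\t".toList).any (fun part => part != "*-".toList))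

-- keep = 0; for i, line in enumerate(lines): if any(...): keep = i + 1
def pvKeepB (lines : List String) : Int :=
  (PySem.List.enumerate lines 0).foldl
    (fun keep p => if pvNotTermB p.2 then p.1 + 1 else keep) 0

-- return lines[:keep]
def strip_terminator_py_alt (lines : List String) : List String :=
  PySem.List.slice lines none (some (pvKeepB lines))

-- ===== PRECONDITION & SPEC =====
def Spec_strip_terminator_py (lines : List String) (out : List String) : Prop := out = strip_terminator_py_alt lines
instance (lines : List String) (out : List String) : Decidable (Spec_strip_terminator_py lines out) := by unfold Spec_strip_terminator_py; infer_instance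

-- ===== CLAIM =====
def Claim_equal_strip_terminator_py : Prop := ∀ (lines : List String), Dom_strip_terminator_py lines → Spec_strip_terminator_py lines (strip_terminator_py lines)

-- ===== LEMMAS AND PROOFS =====
theorem notTerm_eq_not_term (a : String) : pvNotTermB a = !pvTermTestA a := by
  simp [pvNotTermB, pvTermTestA, List.any_eq_not_all_not, bne]

theorem keep_append (l : List String) (a : String) :
    pvKeepB (l ++ [a]) = if pvNotTermB a then (l.length : Int) + 1 else pvKeepB l := by
  simp [pvKeepB, PySem.List.enumerate_append, List.foldl_append, PySem.List.enumerate_cons]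

theorem keep_bounds (l : List String) : 0 ≤ pvKeepB l ∧ pvKeepB l ≤ l.length := by
  induction l using List.reverseRecOn with
  | nil => simp [pvKeepB]
  | append_singleton l a ih =>
      rw [keep_append]
      by_cases h : pvNotTermB a <;> simp [h] <;> omega

theorem strip_terminator_eq_take (l : List String) :
    strip_terminator_py l = l.take (pvKeepB l).toNat := by
  induction l using List.reverseRecOn with
  | nil => simp [strip_terminator_py]
  | append_singleton l a ih =>
      rw [strip_terminator_py]
      have hne : l ++ [a] ≠ [] := by simp
      simp only [dif_neg hne, List.getLast_append_singleton, List.dropLast_concat]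
      rw [keep_append, notTerm_eq_not_term]
      by_cases h : pvTermTestA a
      · have hle : (pvKeepB l).toNat ≤ l.length := by
          have := keep_bounds l; omega
        simp [h, ih, List.take_append_of_le_length hle]
      · have hlen : (((l.length : Int) + 1)).toNat = l.length + 1 := by omega
        simp [h, hlen, List.take_of_length_le (by simp : (l ++ [a]).length ≤ l.length + 1)]

theorem alt_eq_take (l : List String) :
    strip_terminator_py_alt l = l.take (pvKeepB l).toNat := by
  have h0 : 0 ≤ pvKeepB l := (keep_bounds l).1
  have : pvKeepB l = ((pvKeepB l).toNat : Int) := by omega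
  rw [strip_terminator_py_alt, this, PySem.List.slice_to_natCast, Int.toNat_natCast]

-- ===== VERDICT =====
theorem strip_terminator_py_spec : Claim_equal_strip_terminator_py := by
  intro lines _
  rw [Spec_strip_terminator_py, alt_eq_take, strip_terminator_eq_take]
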